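-- pv_equiv track=rewrite | github.com/ChrisO345/furthermaths-module | furthermaths/factorial.py | nth_factorial
-- ===== SOURCE A (Python) =====
-- def nth_factorial(n, k) -> int:
--     """
--     finds the nth factorial of n -> n!k
--
--     :param n: any real positive integer
--     :param k: any real positive integer
--     :return:
--     """
--     if not isinstance(n, int) or n < 0:
--         raise ValueError("nth_factorial() must be a positive integer")
--     elif type(k) != int or k < 0:
--         raise ValueError("nth_factorial() must be a positive integer")
--     elif n == 0:
--         return 1
--     elif n < k:
--         return k
--     return n * nth_factorial(n-k, k)
-- ===== SOURCE B (Python) =====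
-- def nth_factorial(n, k) -> int:
--     if not isinstance(n, int) or n < 0:
--         raise ValueError("nth_factorial() must be a positive integer")
--     elif type(k) != int or k < 0:
--         raise ValueError("nth_factorial() must be a positive integer")
--     result = 1
--     m = n
--     while m != 0 and m >= k:
--         result *= m
--         m -= k
--     return result * k if m != 0 else result
-- ===== Notes on version B (the rewrite author's own statement) =====
-- stated objective: alternative
-- what changed: Replaces A's recursion n*f(n-k,k) by an iterative accumulator loop (result*=m; m-=k) with a final remainder factor, keeping the same guards.
import Mathlib
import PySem

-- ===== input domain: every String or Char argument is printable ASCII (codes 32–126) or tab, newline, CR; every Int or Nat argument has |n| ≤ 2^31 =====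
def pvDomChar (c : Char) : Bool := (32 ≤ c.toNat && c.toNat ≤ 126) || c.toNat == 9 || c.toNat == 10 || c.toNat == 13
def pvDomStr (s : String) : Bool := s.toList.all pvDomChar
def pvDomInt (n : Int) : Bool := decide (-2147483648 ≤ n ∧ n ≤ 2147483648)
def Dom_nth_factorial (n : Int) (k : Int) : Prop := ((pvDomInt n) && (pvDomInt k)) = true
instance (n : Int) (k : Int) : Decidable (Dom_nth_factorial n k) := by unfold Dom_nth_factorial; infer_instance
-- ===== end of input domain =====

-- B replaces A's recursion by an iterative accumulator loop with a final remainder factor (alternative decomposition, same cost).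

-- ===== PORT A =====
-- A's recursion n ↦ n-k, made total with fuel n.toNat+1; on Pre_ (0 ≤ n, and k ≥ 1 or n = 0)
-- the fuel is never exhausted, so this is a step-for-step transcription of A's recursion.
def nthFactA (fuel : Nat) (n : Int) (k : Int) : Int :=
  match fuel with
  | 0 => 0
  | fuel + 1 =>
    if n = 0 then 1
    else if n < k then k
    else n * nthFactA fuel (n - k) k

def nth_factorial (n : Int) (k : Int) : Int := nthFactA (n.toNat + 1) n k

-- ===== PORT B =====
-- B's while-loop `while m != 0 and m >= k: result *= m; m -= k`, fuel n.toNat+1 (never exhausted on Pre_).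
def nthFactLoopB (fuel : Nat) (m : Int) (k : Int) (result : Int) : Int :=
  match fuel with
  | 0 => if m ≠ 0 then result * k else result
  | fuel + 1 =>
    if m ≠ 0 ∧ m ≥ k then nthFactLoopB fuel (m - k) k (result * m)
    else if m ≠ 0 then result * k else result

def nth_factorial_alt (n : Int) (k : Int) : Int := nthFactLoopB (n.toNat + 1) n k 1

-- ===== PRECONDITION & SPEC =====
-- Pre_ excludes n < 0 and k < 0 (A raises ValueError) and k = 0 with n > 0 (A raises
-- RecursionError from unbounded recursion; B's loop would not terminate there either).
def Pre_nth_factorial (n : Int) (k : Int) : Prop := 0 ≤ n ∧ 0 ≤ k ∧ (k ≠ 0 ∨ n = 0)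
instance (n : Int) (k : Int) : Decidable (Pre_nth_factorial n k) := by unfold Pre_nth_factorial; infer_instance
def pvWitness_nth_factorial : Int × Int := (7, 2)

def Spec_nth_factorial (n : Int) (k : Int) (out : Int) : Prop := out = nth_factorial_alt n k
instance (n : Int) (k : Int) (out : Int) : Decidable (Spec_nth_factorial n k out) := by unfold Spec_nth_factorial; infer_instance

-- ===== CLAIM (what is proved, stated in full; the proofs are below) =====
def Claim_equal_nth_factorial : Prop := ∀ (n : Int) (k : Int), Dom_nth_factorial n k → Pre_nth_factorial n k → Spec_nth_factorial n k (nth_factorial n k)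

-- ===== LEMMAS AND PROOFS =====

-- Loop/recursion correspondence: with enough fuel and k ≥ 1, the loop with accumulator
-- `result` computes result * (A's recursion).
theorem nthFact_loop_eq (fuel : Nat) : ∀ (n k result : Int), 1 ≤ k → 0 ≤ n → n.toNat < fuel →
    nthFactLoopB fuel n k result = result * nthFactA fuel n k := by
  induction fuel with
  | zero => intro n k result _ _ h; omega
  | succ f ih =>
    intro n k result hk hn _
    by_cases h0 : n = 0
    · subst h0; simp [nthFactLoopB, nthFactA]
    · by_cases hlt : n < k
      · have : ¬ (n ≠ 0 ∧ n ≥ k) := by omega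
        simp [nthFactLoopB, nthFactA, this, h0, hlt]
      · have hc : n ≠ 0 ∧ n ≥ k := by omega
        have hfuel : (n - k).toNat < f := by omega
        simp only [nthFactLoopB, nthFactA, if_pos hc, if_neg h0, if_neg hlt]
        rw [ih (n - k) k (result * n) hk (by omega) hfuel]
        ring

-- ===== VERDICT (by name: the statement is the Claim_ definition above) =====
theorem nth_factorial_spec : Claim_equal_nth_factorial := by
  intro n k _ ⟨hn, hk, hor⟩
  unfold Spec_nth_factorial nth_factorial nth_factorial_alt
  rcases hor with hk1 | h0
  · rw [nthFact_loop_eq (n.toNat + 1) n k 1 (by omega) hn (by omega)]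
    ring
  · subst h0; simp [nthFactA, nthFactLoopB]
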